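-- pv_equiv track=rewrite | github.com/soyeht/soyeht-ios | scripts/ci/lint-ui-resources.py | strip_swift_strings_preserving_positions
-- ===== SOURCE A (Python) =====
-- def strip_swift_strings_preserving_positions(source: str) -> str:
--     chars = list(source)
--     index = 0
--     in_string = False
--     escaped = False
--
--     while index < len(chars):
--         char = chars[index]
--
--         if in_string:
--             if char != "\n":
--                 chars[index] = " "
--             if escaped:
--                 escaped = False
--             elif char == "\\":
--                 escaped = True
--             elif char == '"':
--                 in_string = False
--             index += 1
--             continue
--
--         if char == '"':
--             chars[index] = " "
--             in_string = True
--
--         index += 1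
--
--     return "".join(chars)
-- ===== SOURCE B (Python) =====
-- import re
--
-- _LITERAL = re.compile(r'"(?:\\[\s\S]?|[^"\\])*(?:"|$)')
--
--
-- def _blank(match):
--     return ''.join('\n' if c == '\n' else ' ' for c in match.group())
--
--
-- def strip_swift_strings_preserving_positions(source: str) -> str:
--     return _LITERAL.sub(_blank, source)
-- ===== Notes on version B (the rewrite author's own statement) =====
-- stated objective: idiomatic
-- what changed: Replaces the manual in_string/escaped character loop with a single regex that matches whole Swift string literals (including unterminated ones and a dangling backslash) and re.sub with a same-length blanking callback.
import Mathlib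
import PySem

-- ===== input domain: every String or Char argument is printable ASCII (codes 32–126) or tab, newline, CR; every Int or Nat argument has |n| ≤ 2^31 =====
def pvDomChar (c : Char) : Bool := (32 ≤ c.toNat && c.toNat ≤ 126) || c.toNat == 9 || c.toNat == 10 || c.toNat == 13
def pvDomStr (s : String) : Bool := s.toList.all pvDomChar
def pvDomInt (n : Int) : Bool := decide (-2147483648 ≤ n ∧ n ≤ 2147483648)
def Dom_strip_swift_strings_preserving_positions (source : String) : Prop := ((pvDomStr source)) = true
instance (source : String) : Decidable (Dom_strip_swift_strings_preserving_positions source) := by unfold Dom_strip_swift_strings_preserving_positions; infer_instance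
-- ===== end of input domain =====

-- B replaces A's manual in_string/escaped character loop with a regex matching whole
-- string literals, blanked by a same-length callback (idiomatic; same cost).

-- ===== PORT A =====
-- A's while-loop over the char array with (in_string, escaped) state; the index walk
-- becomes structural recursion on the remaining characters, branches in A's order.
def stripGoA : List Char → Bool → Bool → List Char
  | [], _, _ => []
  | c :: rest, inString, escaped =>
    if inString then
      let c' := if c ≠ '\n' then ' ' else c
      if escaped then c' :: stripGoA rest true false
      else if c = '\\' then c' :: stripGoA rest true true
      else if c = '"' then c' :: stripGoA rest false false
      else c' :: stripGoA rest true false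
    else
      if c = '"' then ' ' :: stripGoA rest true false
      else c :: stripGoA rest false false

def strip_swift_strings_preserving_positions (source : String) : String :=
  String.mk (stripGoA source.toList false false)

-- ===== PORT B =====
-- Hand port of B's regex engine run: `consumeLit` matches the literal body after an
-- opening quote — (?:\\[\s\S]?|[^"\\])* followed by a closing quote or end of input —
-- returning the blanked match plus the remainder; `subLits` is re.sub's scan for the
-- next match. Exact for this pattern on all inputs.
def blankChar (c : Char) : Char := if c = '\n' then '\n' else ' '

def consumeLit : List Char → List Char × List Char
  | [] => ([], [])
  | '"' :: rest => ([' '], rest)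
  | '\\' :: [] => ([' '], [])
  | '\\' :: c :: rest =>
      let r := consumeLit rest
      (' ' :: blankChar c :: r.1, r.2)
  | c :: rest =>
      let r := consumeLit rest
      (blankChar c :: r.1, r.2)

theorem consumeLit_snd_le (l : List Char) : (consumeLit l).2.length ≤ l.length := by
  induction l using consumeLit.induct <;> simp_all [consumeLit] <;> omega

def subLits : List Char → List Char
  | [] => []
  | '"' :: rest =>
      let r := consumeLit rest
      ' ' :: r.1 ++ subLits r.2
  | c :: rest => c :: subLits rest
termination_by l => l.length
decreasing_by
  · exact Nat.lt_succ_of_le (consumeLit_snd_le rest)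
  · simp

def strip_swift_strings_preserving_positions_alt (source : String) : String :=
  String.mk (subLits source.toList)

-- ===== PRECONDITION & SPEC =====
def Spec_strip_swift_strings_preserving_positions (source : String) (out : String) : Prop := out = strip_swift_strings_preserving_positions_alt source
instance (source : String) (out : String) : Decidable (Spec_strip_swift_strings_preserving_positions source out) := by unfold Spec_strip_swift_strings_preserving_positions; infer_instance

-- ===== CLAIM (what is proved, stated in full; the proofs are below) =====
def Claim_equal_strip_swift_strings_preserving_positions : Prop := ∀ (source : String), Dom_strip_swift_strings_preserving_positions source → Spec_strip_swift_strings_preserving_positions source (strip_swift_strings_preserving_positions source)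

-- ===== LEMMAS AND PROOFS =====

-- Joint invariant, by strong induction on length: outside a string A's loop is B's
-- scan-for-next-match; inside a string (escaped = false) A's loop produces exactly the
-- blanked literal body that B's consumeLit matches, then resumes the outer scan.
theorem stripGoA_eq (n : Nat) (l : List Char) (h : l.length ≤ n) :
    stripGoA l false false = subLits l ∧
    stripGoA l true false = (consumeLit l).1 ++ subLits (consumeLit l).2 := by
  induction n generalizing l with
  | zero =>
    have hl : l = [] := List.eq_nil_of_length_eq_zero (Nat.le_zero.mp h)
    subst hl
    simp [stripGoA, subLits, consumeLit]
  | succ n ih =>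
    match l with
    | [] => simp [stripGoA, subLits, consumeLit]
    | c :: rest =>
      have hr : rest.length ≤ n := by
        have := h; simp at this; omega
      refine ⟨?_, ?_⟩
      · by_cases hc : c = '"'
        · subst hc
          simp [stripGoA, subLits, (ih rest hr).2]
        · simp [stripGoA, subLits, hc, (ih rest hr).1]
      · by_cases hc : c = '"'
        · subst hc
          simp [stripGoA, consumeLit, (ih rest hr).1]
        · by_cases hb : c = '\\'
          · subst hb
            match rest with
            | [] => simp [stripGoA, consumeLit, subLits]
            | d :: rest' =>
              have hr' : rest'.length ≤ n := by
                simp at hr; omega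
              have hih := (ih rest' hr').2
              by_cases hd : d = '\n' <;>
                simp [stripGoA, consumeLit, blankChar, hd, hih]
          · have hih := (ih rest hr).2
            by_cases hd : c = '\n'
            · subst hd
              simp [stripGoA, consumeLit, blankChar, hih, hc, hb]
            · simp [stripGoA, consumeLit, blankChar, hc, hb, hd, hih]

-- ===== VERDICT (by name: the statement is the Claim_ definition above) =====
theorem strip_swift_strings_preserving_positions_spec : Claim_equal_strip_swift_strings_preserving_positions := by
  intro source _
  unfold Spec_strip_swift_strings_preserving_positions strip_swift_strings_preserving_positions
    strip_swift_strings_preserving_positions_alt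
  exact congrArg String.mk (stripGoA_eq source.toList.length source.toList le_rfl).1
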